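-- pv_equiv track=rewrite | github.com/e3tools/local-development-portal | cosomis/administrativelevels/views.py | __build_lambda_filter
-- ===== SOURCE A (Python) =====
-- from typing import Optional, Dict, List, Tuple, Any
--
-- def __build_lambda_filter(attachments: List[any], query_params: dict) -> Optional[List]:
--     filters = []
--
--     type_of_document = query_params.get('type')
--     if type_of_document is not None and type_of_document is not '':
--         filters.append(lambda p: p.get('type') == type_of_document)
--
--     phase = query_params.get('phase')
--     if phase is not None and phase is not '':
--         filters.append(lambda p: p.get('phase') == phase)
--
--     activity = query_params.get('activity')
--     if activity is not None and activity is not '':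
--         filters.append(lambda p: p.get('activity') == activity)
--
--     task = query_params.get('task')
--     if task is not None and task is not '':
--         filters.append(lambda p: p.get('task') == task)
--
--     try:
--         return list(filter(lambda p: all(f(p) for f in filters), attachments))
--     except StopIteration:
--         return None
-- ===== SOURCE B (Python) =====
-- from typing import Optional, List
--
-- def __build_lambda_filter(attachments: List[any], query_params: dict) -> Optional[List]:
--     # Staged narrowing: instead of collecting predicates and testing them all in one
--     # filter pass, successively re-filter the surviving list once per active field.
--     result = list(attachments)
--     for field in ('type', 'phase', 'activity', 'task'):
--         v = query_params.get(field)
--         if v is not None and v != '':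
--             result = [p for p in result if p.get(field) == v]
--     return result
-- ===== Notes on version B (the rewrite author's own statement) =====
-- stated objective: simpler
-- what changed: Replaces A's list of predicate closures tested together in one filter pass by staged narrowing: a loop over the fixed field tuple that re-filters the surviving attachment list once per active field, with no closures and no try/except.
import Mathlib
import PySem

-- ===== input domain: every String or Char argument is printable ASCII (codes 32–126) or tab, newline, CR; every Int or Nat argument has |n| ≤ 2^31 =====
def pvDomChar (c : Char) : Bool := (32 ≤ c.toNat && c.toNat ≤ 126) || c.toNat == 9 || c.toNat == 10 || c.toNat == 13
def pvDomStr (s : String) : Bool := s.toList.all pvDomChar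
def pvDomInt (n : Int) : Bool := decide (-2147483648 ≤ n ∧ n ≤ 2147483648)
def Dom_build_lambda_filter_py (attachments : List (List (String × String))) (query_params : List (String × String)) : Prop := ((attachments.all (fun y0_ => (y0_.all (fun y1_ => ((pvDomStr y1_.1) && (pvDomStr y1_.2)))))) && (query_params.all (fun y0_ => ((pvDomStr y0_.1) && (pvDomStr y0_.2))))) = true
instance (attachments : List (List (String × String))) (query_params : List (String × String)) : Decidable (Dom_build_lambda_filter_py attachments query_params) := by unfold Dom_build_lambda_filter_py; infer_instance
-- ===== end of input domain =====

-- B replaces A's collected predicate closures tested in one filter pass by staged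
-- narrowing: the attachment list is re-filtered once per active field (objective: simpler).

-- ===== PORT A =====
-- literal transliteration of A: four explicit branches, each appending a closure to `filters`,
-- then one filter pass asking that all closures hold.  (A's `v is not ''` is the identity test:
-- on the all-string domain it coincides with `v ≠ ""` since CPython's '' is a singleton.)
def build_lambda_filter_py (attachments : List (List (String × String))) (query_params : List (String × String)) : Option (List (List (String × String))) :=
  let qp := PySem.Dict.mk query_params
  let filters : List (List (String × String) → Bool) := []
  let filters :=
    match qp.get? "type" with
    | some type_of_document =>
        if type_of_document ≠ "" then
          filters ++ [fun p => (PySem.Dict.mk p).get? "type" == some type_of_document]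
        else filters
    | none => filters
  let filters :=
    match qp.get? "phase" with
    | some phase =>
        if phase ≠ "" then
          filters ++ [fun p => (PySem.Dict.mk p).get? "phase" == some phase]
        else filters
    | none => filters
  let filters :=
    match qp.get? "activity" with
    | some activity =>
        if activity ≠ "" then
          filters ++ [fun p => (PySem.Dict.mk p).get? "activity" == some activity]
        else filters
    | none => filters
  let filters :=
    match qp.get? "task" with
    | some task =>
        if task ≠ "" then
          filters ++ [fun p => (PySem.Dict.mk p).get? "task" == some task]
        else filters
    | none => filters
  -- list(filter(lambda p: all(f(p) for f in filters), attachments)); the except StopIteration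
  -- branch is dead (nothing in the body raises StopIteration), so the port always returns `some`.
  some (attachments.filter (fun p => filters.all (fun f => f p)))

-- ===== PORT B =====
-- transliteration of Source B: a loop over the fixed field tuple that re-filters the
-- surviving list `result` once per active field (staged narrowing).
def build_lambda_filter_py_alt (attachments : List (List (String × String))) (query_params : List (String × String)) : Option (List (List (String × String))) :=
  let qp := PySem.Dict.mk query_params
  let result :=
    ["type", "phase", "activity", "task"].foldl
      (fun acc field =>
        match qp.get? field with
        | some v =>
            if v ≠ "" then acc.filter (fun p => (PySem.Dict.mk p).get? field == some v)
            else acc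
        | none => acc)
      attachments
  some result

-- ===== PRECONDITION & SPEC =====
def Spec_build_lambda_filter_py (attachments : List (List (String × String))) (query_params : List (String × String)) (out : Option (List (List (String × String)))) : Prop := out = build_lambda_filter_py_alt attachments query_params
instance (attachments : List (List (String × String))) (query_params : List (String × String)) (out : Option (List (List (String × String)))) : Decidable (Spec_build_lambda_filter_py attachments query_params out) := by unfold Spec_build_lambda_filter_py; infer_instance

-- ===== CLAIM (what is proved, stated in full; the proofs are below) =====
def Claim_equal_build_lambda_filter_py : Prop := ∀ (attachments : List (List (String × String))) (query_params : List (String × String)), Dom_build_lambda_filter_py attachments query_params → Spec_build_lambda_filter_py attachments query_params (build_lambda_filter_py attachments query_params)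

-- ===== LEMMAS AND PROOFS =====

theorem build_lambda_filter_py_agree (attachments : List (List (String × String))) (query_params : List (String × String)) :
    build_lambda_filter_py attachments query_params = build_lambda_filter_py_alt attachments query_params := by
  unfold build_lambda_filter_py build_lambda_filter_py_alt
  simp only [List.foldl]
  congr 1
  cases hT : (PySem.Dict.mk query_params).get? "type" <;>
  cases hP : (PySem.Dict.mk query_params).get? "phase" <;>
  cases hA : (PySem.Dict.mk query_params).get? "activity" <;>
  cases hK : (PySem.Dict.mk query_params).get? "task" <;>
    simp only [hT, hP, hA, hK] <;>
    (try split_ifs) <;>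
    simp [List.filter_filter, Bool.and_assoc, Bool.and_comm, Bool.and_left_comm]

-- ===== VERDICT (by name: the statement is the Claim_ definition above) =====
theorem build_lambda_filter_py_spec : Claim_equal_build_lambda_filter_py := by
  intro attachments query_params _
  unfold Spec_build_lambda_filter_py
  exact build_lambda_filter_py_agree attachments query_params
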